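-- pv_equiv track=rewrite | github.com/L-EEEEEE/PracticeCodingTest | Week_02/Day_11_Greedy.py | solution
-- ===== SOURCE A (Python) =====
-- def solution(n, lost, reserve):
--     # 1. 중복 제거 (여벌 있는데 도난당한 애들은 제외)
--     # set을 쓰면 차집합 연산(-)이 가능해 매우 편리
--     real_reserve = set(reserve) - set(lost)
--     real_lost = set(lost) - set(reserve)
--
--     # 2. 빌려주기 (앞 번호부터 차례대로 빌려줘야 최대로 빌릴 수 있음 -> 정렬 필요?)
--     # set은 순서가 없으므로 for문 돌릴 때 정렬해서 처리하는 게 안전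
--     for r in sorted(real_reserve):
--         # 앞 번호 학생이 잃어버렸으면 빌려줌
--         if r - 1 in real_lost:
--             real_lost.remove(r - 1)
--         # 뒷 번호 학생이 잃어버렸으면 빌려줌
--         elif r + 1 in real_lost:
--             real_lost.remove(r + 1)
--
--     # 전체 학생 수 - 끝까지 못 빌린 학생 수
--     return n - len(real_lost)
-- ===== SOURCE B (Python) =====
-- def solution(n, lost, reserve):
--     # two-pointer sweep over the two sorted disjoint sets instead of mutating a set
--     ls = sorted(set(lost) - set(reserve))
--     rs = sorted(set(reserve) - set(lost))
--     i = j = 0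
--     matched = 0
--     while i < len(ls) and j < len(rs):
--         if ls[i] < rs[j] - 1:
--             i += 1
--         elif ls[i] <= rs[j] + 1:
--             matched += 1
--             i += 1
--             j += 1
--         else:
--             j += 1
--     return n - (len(ls) - matched)
-- ===== Notes on version B (the rewrite author's own statement) =====
-- stated objective: alternative
-- what changed: Replaces A's set-mutation loop (repeated membership tests and removals on a lost-set while iterating the sorted reserve set) by a single two-pointer merge sweep over the two sorted difference sets that only counts matches.
import Mathlib
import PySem

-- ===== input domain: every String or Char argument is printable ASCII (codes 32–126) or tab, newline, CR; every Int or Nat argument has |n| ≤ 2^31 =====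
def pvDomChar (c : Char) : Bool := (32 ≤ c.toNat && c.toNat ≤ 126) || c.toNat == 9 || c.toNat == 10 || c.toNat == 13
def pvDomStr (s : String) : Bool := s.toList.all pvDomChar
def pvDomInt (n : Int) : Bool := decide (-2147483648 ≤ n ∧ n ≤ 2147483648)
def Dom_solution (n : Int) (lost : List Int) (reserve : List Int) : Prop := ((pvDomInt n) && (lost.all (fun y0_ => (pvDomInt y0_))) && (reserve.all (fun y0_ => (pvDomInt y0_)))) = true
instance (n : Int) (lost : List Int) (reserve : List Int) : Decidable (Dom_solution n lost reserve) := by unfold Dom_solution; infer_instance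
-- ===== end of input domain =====

-- B replaces A's set-mutation loop by a two-pointer merge sweep over the two sorted
-- difference sets (objective: alternative algorithm of similar cost).

-- ===== PORT A =====
-- loop body of A's `for r in sorted(real_reserve)` (the guard makes set.remove = discard here)
def stepA (rl : PySem.Set Int) (r : Int) : PySem.Set Int :=
  if PySem.Set.contains rl (r - 1) then PySem.Set.discard rl (r - 1)
  else if PySem.Set.contains rl (r + 1) then PySem.Set.discard rl (r + 1)
  else rl
def solution (n : Int) (lost : List Int) (reserve : List Int) : Int :=
  let realReserve := PySem.Set.diff (PySem.Set.ofList reserve) (PySem.Set.ofList lost)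
  let realLost := PySem.Set.diff (PySem.Set.ofList lost) (PySem.Set.ofList reserve)
  let finalLost := (PySem.List.sorted realReserve (fun x => x)).foldl stepA realLost
  n - PySem.Set.len finalLost

-- ===== PORT B =====
-- B's while loop with two indices, transcribed as recursion on the two list suffixes
def tpMatched : List Int → List Int → Int → Int
  | l :: ls, r :: rs, m =>
    if l < r - 1 then tpMatched ls (r :: rs) m
    else if l ≤ r + 1 then tpMatched ls rs (m + 1)
    else tpMatched (l :: ls) rs m
  | _, _, m => m
termination_by ls rs _ => ls.length + rs.length
def solution_alt (n : Int) (lost : List Int) (reserve : List Int) : Int :=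
  let ls := PySem.List.sorted (PySem.Set.diff (PySem.Set.ofList lost) (PySem.Set.ofList reserve)) (fun x => x)
  let rs := PySem.List.sorted (PySem.Set.diff (PySem.Set.ofList reserve) (PySem.Set.ofList lost)) (fun x => x)
  n - ((ls.length : Int) - tpMatched ls rs 0)

-- ===== PRECONDITION & SPEC =====
def Spec_solution (n : Int) (lost : List Int) (reserve : List Int) (out : Int) : Prop := out = solution_alt n lost reserve
instance (n : Int) (lost : List Int) (reserve : List Int) (out : Int) : Decidable (Spec_solution n lost reserve out) := by unfold Spec_solution; infer_instance

-- ===== CLAIM (what is proved, stated in full; the proofs are below) =====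
def Claim_equal_solution : Prop := ∀ (n : Int) (lost : List Int) (reserve : List Int), Dom_solution n lost reserve → Spec_solution n lost reserve (solution n lost reserve)

-- ===== LEMMAS AND PROOFS =====

-- proof-side counter mirroring tpMatched with the accumulator stripped
def tpCount : List Int → List Int → Nat
  | l :: ls, r :: rs =>
    if l < r - 1 then tpCount ls (r :: rs)
    else if l ≤ r + 1 then tpCount ls rs + 1
    else tpCount (l :: ls) rs
  | _, _ => 0
termination_by ls rs => ls.length + rs.length


lemma tpMatched_eq (ls rs : List Int) (m : Int) : tpMatched ls rs m = m + tpCount ls rs := by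
  fun_induction tpMatched ls rs m with
  | case1 l ls r rs m h ih => rw [tpCount]; simp [h, ih]
  | case2 l ls r rs m h h2 ih => rw [tpCount]; simp [h, h2, ih]; ring
  | case3 l ls r rs m h h2 ih => rw [tpCount]; simp [h, h2, ih]
  | case4 ls rs m h =>
    cases ls with
    | nil => simp [tpCount]
    | cons a as => cases rs with
      | nil => simp [tpCount]
      | cons b bs => exact (h a as b bs rfl rfl).elim

lemma stepA_nil (r : Int) : stepA [] r = [] := by
  simp [stepA, PySem.Set.contains]

lemma foldl_stepA_nil (R : List Int) : R.foldl stepA [] = [] := by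
  induction R with
  | nil => rfl
  | cons r R ih => simp [List.foldl, stepA_nil, ih]

lemma stepA_perm (S S' : List Int) (r : Int) (h : S.Perm S') : (stepA S r).Perm (stepA S' r) := by
  have hm : ∀ x : Int, PySem.Set.contains S x = PySem.Set.contains S' x := by
    intro x; simp [PySem.Set.contains, h.mem_iff]
  simp only [stepA, PySem.Set.discard, hm]
  split_ifs <;> first | exact h.filter _ | exact h

lemma perm_foldl_stepA (R S S' : List Int) (h : S.Perm S') :
    (R.foldl stepA S).Perm (R.foldl stepA S') := by
  induction R generalizing S S' with
  | nil => exact h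
  | cons r R ih => exact ih _ _ (stepA_perm _ _ _ h)

lemma step_filter (S : List Int) (l r : Int) (h1 : l ≠ r - 1) (h2 : l ≠ r + 1) :
    stepA (S.filter (fun y => y != l)) r = (stepA S r).filter (fun y => y != l) := by
  have hc : ∀ x : Int, x ≠ l →
      (PySem.Set.contains (S.filter (fun y => y != l)) x = PySem.Set.contains S x) := by
    intro x hx
    simp [PySem.Set.contains, List.mem_filter, hx]
  simp only [stepA, PySem.Set.discard, hc _ h1.symm, hc _ h2.symm]
  split_ifs <;> simp [List.filter_filter] <;> congr 1 <;> funext y <;> rw [Bool.and_comm]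

lemma foldl_filter (R : List Int) (S : List Int) (l : Int)
    (h : ∀ r ∈ R, l ≠ r - 1 ∧ l ≠ r + 1) :
    R.foldl stepA (S.filter (fun y => y != l)) = (R.foldl stepA S).filter (fun y => y != l) := by
  induction R generalizing S with
  | nil => rfl
  | cons r R ih =>
    simp only [List.foldl_cons]
    rw [step_filter S l r (h r (by simp)).1 (h r (by simp)).2]
    exact ih _ (fun r' hr' => h r' (by simp [hr']))

lemma mem_stepA (S : List Int) (l r : Int) (h1 : l ≠ r - 1) (h2 : l ≠ r + 1) (hl : l ∈ S) :
    l ∈ stepA S r := by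
  simp only [stepA, PySem.Set.discard]
  split_ifs <;> simp [List.mem_filter, hl, h1, h2]

lemma mem_foldl_stepA (R S : List Int) (l : Int)
    (h : ∀ r ∈ R, l ≠ r - 1 ∧ l ≠ r + 1) (hl : l ∈ S) :
    l ∈ R.foldl stepA S := by
  induction R generalizing S with
  | nil => exact hl
  | cons r R ih =>
    exact ih _ (fun r' hr' => h r' (by simp [hr']))
      (mem_stepA S l r (h r (by simp)).1 (h r (by simp)).2 hl)

lemma nodup_stepA (S : List Int) (r : Int) (h : S.Nodup) : (stepA S r).Nodup := by
  simp only [stepA, PySem.Set.discard]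
  split_ifs <;> first | exact h.filter _ | exact h

lemma nodup_foldl_stepA (R S : List Int) (h : S.Nodup) : (R.foldl stepA S).Nodup := by
  induction R generalizing S with
  | nil => exact h
  | cons r R ih => exact ih _ (nodup_stepA S r h)

lemma length_filter_ne (T : List Int) (l : Int) (hnd : T.Nodup) (hl : l ∈ T) :
    (T.filter (fun y => y != l)).length + 1 = T.length := by
  have he : T.erase l = T.filter (fun y => y != l) := hnd.erase_eq_filter l
  have h2 := List.length_erase_of_mem hl
  have h3 := List.length_pos_of_mem hl
  rw [← he, h2]
  omega

lemma stepA_eq_tail (l r : Int) (ls : List Int) (hgt : ∀ y ∈ ls, l < y)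
    (hlr : l = r - 1 ∨ l = r + 1) : stepA (l :: ls) r = ls := by
  have hd : PySem.Set.discard (l :: ls) l = ls := by
    simp only [PySem.Set.discard, List.filter_cons]
    have hll : (!(l == l)) = false := by simp
    rw [hll]
    simp only [Bool.false_eq_true, if_false]
    exact List.filter_eq_self.mpr (fun y hy => by have := hgt y hy; simp; omega)
  rcases hlr with h | h
  · have hc : PySem.Set.contains (l :: ls) (r - 1) = true := by
      simp [PySem.Set.contains, ← h]
    simp only [stepA, hc, if_true]
    rw [← h, hd]
  · have hc1 : PySem.Set.contains (l :: ls) (r - 1) = false := by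
      simp only [PySem.Set.contains, List.contains_eq_mem, decide_eq_false_iff_not,
        List.mem_cons]
      rintro (h' | h')
      · omega
      · have := hgt _ h'; omega
    have hc2 : PySem.Set.contains (l :: ls) (r + 1) = true := by
      simp [PySem.Set.contains, ← h]
    simp only [stepA, hc1, Bool.false_eq_true, if_false, hc2, if_true]
    rw [← h, hd]

lemma stepA_skip (l r : Int) (ls : List Int) (hgt : ∀ y ∈ ls, l < y) (h : r + 1 < l) :
    stepA (l :: ls) r = l :: ls := by
  have hc1 : PySem.Set.contains (l :: ls) (r - 1) = false := by
    simp only [PySem.Set.contains, List.contains_eq_mem, decide_eq_false_iff_not,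
      List.mem_cons]
    rintro (h' | h')
    · omega
    · have := hgt _ h'; omega
  have hc2 : PySem.Set.contains (l :: ls) (r + 1) = false := by
    simp only [PySem.Set.contains, List.contains_eq_mem, decide_eq_false_iff_not,
      List.mem_cons]
    rintro (h' | h')
    · omega
    · have := hgt _ h'; omega
  simp only [stepA, hc1, hc2, Bool.false_eq_true, if_false]

lemma main_count (R : List Int) : ∀ (S : List Int), R.Pairwise (· < ·) → S.Pairwise (· < ·) →
    (∀ r ∈ R, r ∉ S) → (R.foldl stepA S).length + tpCount S R = S.length := by
  induction R with
  | nil =>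
    intro S _ _ _
    cases S <;> simp [tpCount]

  | cons r R' ihR =>
    intro S
    induction S with
    | nil => intro _ _ _; simp [List.foldl_cons, stepA_nil, foldl_stepA_nil, tpCount]
    | cons l ls ihS =>
      intro hR hS hdisj
      have hgt : ∀ y ∈ ls, l < y := fun y hy => List.rel_of_pairwise_cons hS hy
      have hls : ls.Pairwise (· < ·) := hS.tail
      have hRlt : ∀ r' ∈ R', r < r' := fun y hy => List.rel_of_pairwise_cons hR hy
      have hnd : (l :: ls).Nodup := List.Pairwise.imp (fun h => ne_of_lt h) hS
      by_cases h1 : l < r - 1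
      · -- l can never be matched: it survives the whole fold and tp skips it
        have hnot : ∀ r' ∈ r :: R', l ≠ r' - 1 ∧ l ≠ r' + 1 := by
          intro r' hr'
          rcases List.mem_cons.1 hr' with h' | h'
          · omega
          · have := hRlt _ h'; omega
        have hfil : (l :: ls).filter (fun y => y != l) = ls := by
          have hts : ls.filter (fun y => y != l) = ls :=
            List.filter_eq_self.mpr (fun y hy => by have := hgt y hy; simp; omega)
          rw [List.filter_cons]
          simp [hts]
        have hflt := foldl_filter (r :: R') (l :: ls) l hnot
        rw [hfil] at hflt
        have hmem := mem_foldl_stepA (r :: R') (l :: ls) l hnot (by simp)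
        have hnd' := nodup_foldl_stepA (r :: R') (l :: ls) hnd
        have hlen := length_filter_ne _ l hnd' hmem
        rw [← hflt] at hlen
        have hih := ihS hR hls (fun r' hr' => fun hm => hdisj r' hr' (List.mem_cons_of_mem l hm))
        rw [tpCount, if_pos h1]
        simp only [List.length_cons]
        omega
      · by_cases h2 : l ≤ r + 1
        · -- match: l is r-1 or r+1, the step removes it
          have hlr : l ≠ r := by
            intro h; exact hdisj r (by simp) (by simp [h])
          have hstep : stepA (l :: ls) r = ls :=
            stepA_eq_tail l r ls hgt (by omega)
          have hih := ihR ls hR.tail hls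
            (fun r' hr' => fun hm => hdisj r' (List.mem_cons_of_mem r hr')
              (List.mem_cons_of_mem l hm))
          rw [tpCount, if_neg h1, if_pos h2]
          simp only [List.foldl_cons, hstep, List.length_cons]
          omega
        · -- r too small for everyone: the step is a no-op
          have hstep : stepA (l :: ls) r = l :: ls :=
            stepA_skip l r ls hgt (by omega)
          have hih := ihR (l :: ls) hR.tail hS
            (fun r' hr' => hdisj r' (List.mem_cons_of_mem r hr'))
          rw [tpCount, if_neg h1, if_neg h2]
          simp only [List.foldl_cons, hstep]
          omega
lemma pairwise_lt_sorted_diff (xs ys : List Int) :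
    (PySem.List.sorted (PySem.Set.diff (PySem.Set.ofList xs) (PySem.Set.ofList ys)) (fun x => x)).Pairwise (· < ·) := by
  have hnd : (PySem.Set.diff (PySem.Set.ofList xs) (PySem.Set.ofList ys)).Nodup :=
    (PySem.Set.nodup_ofList xs).filter _
  have h1 := PySem.List.sorted_pairwise (xs := PySem.Set.diff (PySem.Set.ofList xs) (PySem.Set.ofList ys)) (key := fun x => x)
  have h2 : (PySem.List.sorted (PySem.Set.diff (PySem.Set.ofList xs) (PySem.Set.ofList ys)) (fun x => x)).Nodup :=
    (PySem.List.sorted_perm _ _ _).nodup_iff.mpr hnd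
  exact (h1.and h2).imp (fun h => lt_of_le_of_ne h.1 h.2)

-- ===== VERDICT (by name: the statement is the Claim_ definition above) =====
theorem solution_spec : Claim_equal_solution := by
  unfold Claim_equal_solution
  intro n lost reserve _
  unfold Spec_solution
  unfold solution solution_alt
  simp only [PySem.Set.len]
  set L0 := PySem.Set.diff (PySem.Set.ofList lost) (PySem.Set.ofList reserve) with hL0
  set R0 := PySem.Set.diff (PySem.Set.ofList reserve) (PySem.Set.ofList lost) with hR0
  set LS := PySem.List.sorted L0 (fun x => x) with hLS
  set RS := PySem.List.sorted R0 (fun x => x) with hRS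
  have hndL : L0.Nodup := (PySem.Set.nodup_ofList lost).filter _
  have permL : LS.Perm L0 := PySem.List.sorted_perm _ _ _
  have hPL : LS.Pairwise (· < ·) := pairwise_lt_sorted_diff lost reserve
  have hPR : RS.Pairwise (· < ·) := pairwise_lt_sorted_diff reserve lost
  have hdisj : ∀ r ∈ RS, r ∉ LS := by
    intro r hr hl
    rw [PySem.List.mem_sorted] at hr hl
    rw [hR0] at hr; rw [hL0] at hl
    simp only [PySem.Set.diff, List.mem_filter, PySem.Set.contains,
      List.contains_eq_mem, Bool.not_eq_eq_eq_not, Bool.not_true, decide_eq_false_iff_not] at hr hl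
    exact hr.2 hl.1
  have hmain := main_count RS LS hPR hPL hdisj
  have hlen : (RS.foldl stepA L0).length = (RS.foldl stepA LS).length :=
    (perm_foldl_stepA RS L0 LS permL.symm).length_eq
  have hml : LS.length = L0.length := permL.length_eq
  rw [tpMatched_eq LS RS 0]
  omega
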